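-- pv_equiv track=rewrite | github.com/HungryVovka/Codewars-Python | 6 kyu/English beggars.py | beggars
-- ===== SOURCE A (Python) =====
-- def beggars(values, n):
--     sumbeg = {}
--     for i in range(n):
--         j = 0
--         for k in values:
--             if sumbeg.get(i):
--                 sumbeg[i] += sum(values[i + j:i + j+ 1])
--             else:
--                 sumbeg[i] = sum(values[i + j:i + j + 1])
--             j += n
--     return list(sumbeg.values())
-- ===== SOURCE B (Python) =====
-- def beggars(values, n):
--     if n <= 0:
--         return []
--     res = [0] * n
--     for idx, v in enumerate(values):
--         res[idx % n] += v
--     return res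
-- ===== Notes on version B (the rewrite author's own statement) =====
-- stated objective: faster
-- what changed: Replaces the n*m nested loops over a dict (one per-element slice-sum per beggar) with a single pass over values accumulating into a size-n bucket array via idx % n.
-- intended difference: On empty values with n > 0, A returns [] because its inner loop never runs so no beggar key is ever inserted, while B returns a list of n zeros -- each of the n beggars receives 0, the intended value. — e.g. on beggars([], 1): A returns [], B returns [0]
import Mathlib
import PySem

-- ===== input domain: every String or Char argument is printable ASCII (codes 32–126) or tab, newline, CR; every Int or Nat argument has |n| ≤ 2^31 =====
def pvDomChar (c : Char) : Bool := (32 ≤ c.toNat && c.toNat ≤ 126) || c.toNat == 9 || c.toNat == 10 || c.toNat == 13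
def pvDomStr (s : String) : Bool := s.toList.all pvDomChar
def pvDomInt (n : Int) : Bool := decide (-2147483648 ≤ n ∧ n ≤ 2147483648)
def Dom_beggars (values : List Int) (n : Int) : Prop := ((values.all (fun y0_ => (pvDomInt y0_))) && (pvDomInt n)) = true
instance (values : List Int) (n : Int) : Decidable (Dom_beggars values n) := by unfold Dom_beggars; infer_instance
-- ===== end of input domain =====

-- B replaces A's n*m nested dict loops by a single pass accumulating values[idx] into
-- bucket idx % n of a size-n array (objective: faster, asymptotic O(n*m) -> O(m+n)).

-- ===== PORT A =====
-- sum(<list of ints>)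
def pySum (l : List Int) : Int := l.foldl (· + ·) 0

-- body of 'for k in values: ...' — state is (sumbeg, j)
def innerBody (values : List Int) (n i : Int)
    (st : PySem.Dict Int Int × Int) (_k : Int) : PySem.Dict Int Int × Int :=
  let sumbeg := st.1
  let j := st.2
  let sumbeg :=
    if (match sumbeg.get? i with | some v => v != 0 | none => false) then
      -- sumbeg[i] += sum(values[i+j : i+j+1])
      sumbeg.insert i (sumbeg.getD i 0 + pySum (PySem.List.slice values (some (i + j)) (some (i + j + 1))))
    else
      -- sumbeg[i] = sum(values[i+j : i+j+1])
      sumbeg.insert i (pySum (PySem.List.slice values (some (i + j)) (some (i + j + 1))))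
  (sumbeg, j + n)

-- body of 'for i in range(n): j = 0; for k in values: ...'
def outerBody (values : List Int) (n : Int)
    (sumbeg : PySem.Dict Int Int) (i : Int) : PySem.Dict Int Int :=
  (values.foldl (innerBody values n i) (sumbeg, 0)).1

def beggars (values : List Int) (n : Int) : List Int :=
  ((PySem.List.pyRange 0 n 1).foldl (outerBody values n) PySem.Dict.empty).values

-- ===== PORT B =====
-- body of 'for idx, v in enumerate(values): res[idx % n] += v'
def bBody (n : Int) (res : List Int) (p : Int × Int) : List Int :=
  let k := (PySem.Int.mod p.1 n).toNat
  res.set k (res.getD k 0 + p.2)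

def beggars_alt (values : List Int) (n : Int) : List Int :=
  if n ≤ 0 then []
  else (PySem.List.enumerate values 0).foldl (bBody n) (List.replicate n.toNat 0)

-- ===== PRECONDITION & SPEC =====
-- On empty values with n > 0, A returns [] because its inner loop never runs so no beggar
-- key is ever inserted, while B returns a list of n zeros — each of the n beggars receives 0,
-- the intended value.
def D_beggars (values : List Int) (n : Int) : Prop := values = [] ∧ 0 < n
instance (values : List Int) (n : Int) : Decidable (D_beggars values n) := by unfold D_beggars; infer_instance

def Spec_beggars (values : List Int) (n : Int) (out : List Int) : Prop :=
  ¬ D_beggars values n → out = beggars_alt values n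
instance (values : List Int) (n : Int) (out : List Int) : Decidable (Spec_beggars values n out) := by unfold Spec_beggars; infer_instance

def pvDiffWitness_beggars : List Int × Int := ([], 1)
def pvDiffWitnessOut_beggars : (List Int) × (List Int) := ([], [0])

-- ===== CLAIM (what is proved, stated in full; the proofs are below) =====
def Claim_unchanged_beggars : Prop := ∀ (values : List Int) (n : Int), Dom_beggars values n → Spec_beggars values n (beggars values n)
def Claim_changed_beggars : Prop := Dom_beggars (pvDiffWitness_beggars.1) (pvDiffWitness_beggars.2) ∧ D_beggars (pvDiffWitness_beggars.1) (pvDiffWitness_beggars.2) ∧ beggars (pvDiffWitness_beggars.1) (pvDiffWitness_beggars.2) = pvDiffWitnessOut_beggars.1 ∧ beggars_alt (pvDiffWitness_beggars.1) (pvDiffWitness_beggars.2) = pvDiffWitnessOut_beggars.2 ∧ pvDiffWitnessOut_beggars.1 ≠ pvDiffWitnessOut_beggars.2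
def Claim_exact_beggars : Prop := ∀ (values : List Int) (n : Int), Dom_beggars values n → D_beggars values n → beggars values n ≠ beggars_alt values n

-- ===== LEMMAS AND PROOFS =====

-- sum(values[a : a+1])
def sliceSum (values : List Int) (a : Int) : Int :=
  pySum (PySem.List.slice values (some a) (some (a + 1)))

-- what beggar i collects: one slice-sum per element of the iterated list, j stepping by n
def rowS (values : List Int) (n i : Int) : Int → List Int → Int
  | _, [] => 0
  | j, _ :: t => sliceSum values (i + j) + rowS values n i (j + n) t

-- B's bucket r total over an enumerate list
def contrib (n : Int) (l : List (Int × Int)) (r : Nat) : Int :=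
  (l.map (fun p => if (PySem.Int.mod p.1 n).toNat = r then p.2 else 0)).sum

theorem innerBody_eq (values : List Int) (n i : Int) (st : PySem.Dict Int Int × Int) (k : Int) :
    innerBody values n i st k =
      (st.1.insert i (st.1.getD i 0 + sliceSum values (i + st.2)), st.2 + n) := by
  unfold innerBody sliceSum
  rcases h : st.1.get? i with _ | v
  · simp [h, PySem.Dict.getD_eq_get?_getD]
  · by_cases hv : v = 0
    · subst hv
      simp [h, PySem.Dict.getD_eq_get?_getD]
    · simp [h, hv, PySem.Dict.getD_eq_get?_getD]

theorem inner_foldl (values : List Int) (n i : Int) :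
    ∀ (l : List Int) (d : PySem.Dict Int Int) (j : Int), l ≠ [] →
      (l.foldl (innerBody values n i) (d, j)).1 =
        d.insert i (d.getD i 0 + rowS values n i j l) := by
  intro l
  induction l with
  | nil => intro d j h; exact absurd rfl h
  | cons x t ih =>
    intro d j _
    rcases t with _ | ⟨y, t'⟩
    · simp [List.foldl, innerBody_eq, rowS]
    · have : (x :: y :: t').foldl (innerBody values n i) (d, j) =
        (y :: t').foldl (innerBody values n i) (innerBody values n i (d, j) x) := rfl
      rw [this, innerBody_eq, ih _ _ (by simp)]
      rw [PySem.Dict.insert_insert_self, PySem.Dict.getD_insert_self]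
      simp [rowS, add_assoc]

theorem outer_foldl (values : List Int) (n : Int) (hv : values ≠ []) :
    ∀ (is : List Int) (d : PySem.Dict Int Int), is.Nodup →
      (∀ i ∈ is, d.contains i = false) →
      (is.foldl (outerBody values n) d).items =
        d.items ++ is.map (fun i => (i, rowS values n i 0 values)) := by
  intro is
  induction is with
  | nil => intro d _ _; simp
  | cons i t ih =>
    intro d hnd hfresh
    have hstep : outerBody values n d i = d.insert i (rowS values n i 0 values) := by
      unfold outerBody
      rw [inner_foldl values n i values d 0 hv]
      rw [PySem.Dict.getD_of_not_contains _ _ (hfresh i (by simp))]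
      rw [zero_add]
    have hfresh' : ∀ i' ∈ t, (d.insert i (rowS values n i 0 values)).contains i' = false := by
      intro i' hi'
      rw [PySem.Dict.contains_insert]
      have : i' ≠ i := by
        intro hEq; exact (List.nodup_cons.mp hnd).1 (hEq ▸ hi')
      simp [this, hfresh i' (List.mem_cons_of_mem _ hi')]
    have : (i :: t).foldl (outerBody values n) d =
        t.foldl (outerBody values n) (outerBody values n d i) := rfl
    rw [this, hstep, ih _ (List.nodup_cons.mp hnd).2 hfresh']
    rw [PySem.Dict.items_insert_of_not_contains _ _ (hfresh i (by simp))]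
    simp

theorem beggars_eq_map (values : List Int) (n : Int) (hv : values ≠ []) :
    beggars values n = (PySem.List.pyRange 0 n 1).map (fun i => rowS values n i 0 values) := by
  unfold beggars
  have h := outer_foldl values n hv (PySem.List.pyRange 0 n 1) PySem.Dict.empty
    (PySem.List.nodup_pyRange_one 0 n) (by intro i _; simp [PySem.Dict.contains_empty])
  simp only [PySem.Dict.values]
  rw [h]
  simp [PySem.Dict.empty, Function.comp]

theorem sliceSum_eq_getD (values : List Int) (a : Int) (ha : 0 ≤ a) :
    sliceSum values a = values.getD a.toNat 0 := by
  unfold sliceSum pySum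
  rw [PySem.List.slice_toNat values ha (by omega : (0:Int) ≤ a + 1)]
  have h1 : (a + 1).toNat - a.toNat = 1 := by omega
  rw [h1]
  rcases h : values.drop a.toNat with _ | ⟨x, xs⟩
  · have : values.length ≤ a.toNat := by
      have := congrArg List.length h
      simp at this
      omega
    simp [List.getD_eq_getElem?_getD, List.getElem?_eq_none (by omega : values.length ≤ a.toNat)]
  · have hx : values[a.toNat]? = some x := by
      have := congrArg (fun l => l[0]?) h
      simpa [List.getElem?_drop] using this
    simp [List.getD_eq_getElem?_getD, hx]

theorem rowS_eq_sum (values : List Int) (n i : Int) :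
    ∀ (l : List Int) (j : Int),
      rowS values n i j l = ∑ t ∈ Finset.range l.length, sliceSum values (i + j + t * n) := by
  intro l
  induction l with
  | nil => intro j; simp [rowS]
  | cons x t ih =>
    intro j
    rw [show (x :: t).length = t.length + 1 from rfl, Finset.sum_range_succ']
    simp only [rowS]
    rw [ih (j + n)]
    have : ∀ k : Nat, i + (j + n) + (k : Int) * n = i + j + ((k : Int) + 1) * n := by
      intro k; ring
    rw [add_comm (sliceSum values (i + j))]
    congr 1
    · apply Finset.sum_congr rfl
      intro k _
      rw [this k]
      push_cast
      ring_nf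
    · norm_num

theorem bfold_length (n : Int) : ∀ (l : List (Int × Int)) (res : List Int),
    (l.foldl (bBody n) res).length = res.length := by
  intro l
  induction l with
  | nil => intro res; rfl
  | cons p t ih => intro res; rw [List.foldl_cons, ih]; simp [bBody]

theorem getD_set_int (res : List Int) (k r : Nat) (x : Int) (hk : k < res.length) :
    (res.set k x).getD r 0 = if r = k then x else res.getD r 0 := by
  by_cases h : r = k
  · subst h
    simp [List.getD_eq_getElem?_getD, hk]
  · have hne : k ≠ r := fun hEq => h hEq.symm
    simp [List.getD_eq_getElem?_getD, List.getElem?_set_ne hne, h]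

theorem bfold_getD (n : Int) : ∀ (l : List (Int × Int)) (res : List Int) (r : Nat),
    (∀ p ∈ l, (PySem.Int.mod p.1 n).toNat < res.length) →
    (l.foldl (bBody n) res).getD r 0 = res.getD r 0 + contrib n l r := by
  intro l
  induction l with
  | nil => intro res r _; simp [contrib]
  | cons p t ih =>
    intro res r hlt
    have hk : (PySem.Int.mod p.1 n).toNat < res.length := hlt p (by simp)
    rw [List.foldl_cons]
    have hlen : (bBody n res p).length = res.length := by simp [bBody]
    rw [ih _ r (by intro q hq; rw [hlen]; exact hlt q (List.mem_cons_of_mem _ hq))]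
    show (res.set _ _).getD r 0 + contrib n t r = _
    rw [getD_set_int res _ r _ hk]
    simp only [contrib, List.map_cons, List.sum_cons]
    by_cases h : r = (PySem.Int.mod p.1 n).toNat
    · simp [h]
      ring
    · have hne : ¬ (PySem.Int.mod p.1 n).toNat = r := fun hEq => h hEq.symm
      simp [h, hne]

theorem contrib_enumerate (n : Int) (r : Nat) :
    ∀ (values : List Int) (s : Int),
      contrib n (PySem.List.enumerate values s) r =
        ∑ k ∈ Finset.range values.length,
          if (PySem.Int.mod (s + k) n).toNat = r then values.getD k 0 else 0 := by
  intro values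
  induction values with
  | nil => intro s; simp [contrib, PySem.List.enumerate_nil]
  | cons x t ih =>
    intro s
    rw [PySem.List.enumerate_cons]
    simp only [contrib, List.map_cons, List.sum_cons]
    have ht := ih (s + 1)
    simp only [contrib] at ht
    have hlen : (x :: t).length = t.length + 1 := rfl
    rw [hlen, Finset.sum_range_succ']
    rw [add_comm]
    congr 1
    · rw [ht]
      apply Finset.sum_congr rfl
      intro k _
      have : s + 1 + (k : Int) = s + ((k : Int) + 1) := by ring
      rw [this]
      push_cast
      norm_num
    · norm_num

theorem core_sum (values : List Int) (N r : Nat) (hN : 0 < N) (hr : r < N) :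
    ∑ t ∈ Finset.range values.length, values.getD (r + t * N) 0 =
      ∑ k ∈ Finset.range values.length, if k % N = r then values.getD k 0 else 0 := by
  set m := values.length with hm
  have hout : ∀ t : Nat, m ≤ r + t * N → values.getD (r + t * N) 0 = 0 := by
    intro t h
    rw [List.getD_eq_getElem?_getD, List.getElem?_eq_none (by omega : values.length ≤ r + t * N)]
    rfl
  have hL : ∑ t ∈ Finset.range m, values.getD (r + t * N) 0 =
      ∑ t ∈ Finset.range m with r + t * N < m, values.getD (r + t * N) 0 := by
    rw [Finset.sum_filter]
    apply Finset.sum_congr rfl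
    intro t _
    by_cases h : r + t * N < m
    · simp [h]
    · rw [if_neg h]; exact hout t (by omega)
  have hR : ∑ k ∈ Finset.range m, (if k % N = r then values.getD k 0 else 0) =
      ∑ k ∈ Finset.range m with k % N = r, values.getD k 0 := by
    rw [Finset.sum_filter]
  rw [hL, hR]
  apply Finset.sum_nbij' (fun t => r + t * N) (fun k => k / N)
  · intro t ht
    simp only [Finset.mem_filter, Finset.mem_range] at *
    refine ⟨by omega, ?_⟩
    rw [Nat.add_mul_mod_self_right, Nat.mod_eq_of_lt hr]
  · intro k hk
    simp only [Finset.mem_filter, Finset.mem_range] at *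
    obtain ⟨hkm, hmod⟩ := hk
    have h1 : k / N ≤ k := Nat.div_le_self k N
    have h2 : r + k / N * N = k := by
      have := Nat.mod_add_div k N
      rw [hmod, Nat.mul_comm] at this
      omega
    exact ⟨by omega, by omega⟩
  · intro t ht
    rw [Nat.add_mul_div_right _ _ hN, Nat.div_eq_of_lt hr]
    omega
  · intro k hk
    simp only [Finset.mem_filter, Finset.mem_range] at hk
    obtain ⟨hkm, hmod⟩ := hk
    have := Nat.mod_add_div k N
    rw [hmod, Nat.mul_comm] at this
    omega
  · intro t ht
    rfl

theorem mod_toNat (k : Nat) (n : Int) (hn : 0 < n) :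
    (PySem.Int.mod (k : Int) n).toNat = k % n.toNat := by
  rw [PySem.Int.mod_eq_emod_of_pos hn]
  have h1 : n = ((n.toNat : Int)) := (Int.toNat_of_nonneg (le_of_lt hn)).symm
  have h2 : (k : Int) % n = ((k % n.toNat : Nat) : Int) := by
    conv_lhs => rw [h1]
    exact (Int.natCast_mod k n.toNat).symm
  rw [h2, Int.toNat_natCast]

theorem fold_nil_values (n : Int) : ∀ (is : List Int) (d : PySem.Dict Int Int),
    is.foldl (outerBody ([] : List Int) n) d = d := by
  intro is
  induction is with
  | nil => intro d; rfl
  | cons i t ih => intro d; exact ih _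

-- ===== VERDICT (by name: the statement is the Claim_ definition above) =====
theorem beggars_spec : Claim_unchanged_beggars := by
  intro values n _ hD
  by_cases hn : n ≤ 0
  · unfold beggars beggars_alt
    rw [PySem.List.pyRange_one_eq_nil (by omega : n ≤ 0), if_pos hn]
    rfl
  · have hnpos : 0 < n := by omega
    have hv : values ≠ [] := by
      intro hv; exact hD ⟨hv, hnpos⟩
    set N := n.toNat with hN
    have hNpos : 0 < N := by omega
    have hcast : n = ((N : Nat) : Int) := (Int.toNat_of_nonneg (le_of_lt hnpos)).symm
    rw [beggars_eq_map values n hv]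
    unfold beggars_alt
    rw [if_neg hn]
    have hlenR : ((PySem.List.enumerate values 0).foldl (bBody n) (List.replicate N 0)).length = N := by
      rw [bfold_length]; simp
    have hkey : ∀ p ∈ PySem.List.enumerate values 0,
        (PySem.Int.mod p.1 n).toNat < (List.replicate N (0 : Int)).length := by
      intro p hp
      obtain ⟨k, hk, rfl⟩ := (PySem.List.mem_enumerate_iff _ _ _).mp hp
      simp only [zero_add, List.length_replicate]
      rw [mod_toNat k n hnpos]
      exact Nat.mod_lt _ hNpos
    apply List.ext_getElem
    · rw [List.length_map, PySem.List.length_pyRange_one, ← hN, hlenR]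
      omega
    · intro i h1 h2
      have hiN : i < N := by
        simp only [List.length_map, PySem.List.length_pyRange_one] at h1
        omega
      rw [List.getElem_map, PySem.List.getElem_pyRange_one]
      rw [← List.getD_eq_getElem _ 0 h2]
      rw [bfold_getD n _ _ i hkey]
      have hrep : (List.replicate N (0 : Int)).getD i 0 = 0 := by
        simp [List.getD_eq_getElem?_getD, List.getElem?_replicate]
        split <;> rfl
      rw [hrep, zero_add]
      -- A side
      rw [rowS_eq_sum]
      have hA : ∑ t ∈ Finset.range values.length, sliceSum values ((i : Int) + 0 + (t : Int) * n) =
          ∑ t ∈ Finset.range values.length, values.getD (i + t * N) 0 := by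
        apply Finset.sum_congr rfl
        intro t _
        have hpos : (0:Int) ≤ (i : Int) + 0 + (t : Int) * n := by positivity
        rw [sliceSum_eq_getD values _ hpos]
        have : ((i : Int) + 0 + (t : Int) * n) = ((i + t * N : Nat) : Int) := by
          rw [hcast]; push_cast; ring
        rw [this, Int.toNat_natCast]
      rw [hA, core_sum values N i hNpos hiN]
      -- B side
      rw [contrib_enumerate]
      simp only [zero_add]
      apply Finset.sum_congr rfl
      intro k _
      rw [mod_toNat k n hnpos]

theorem beggars_changed : Claim_changed_beggars := by
  unfold Claim_changed_beggars; decide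

theorem beggars_tight : Claim_exact_beggars := by
  intro values n _ hD
  obtain ⟨hv, hn⟩ := hD
  subst hv
  unfold beggars beggars_alt
  rw [fold_nil_values, if_neg (by omega : ¬ n ≤ 0)]
  intro hEq
  have := congrArg List.length hEq
  rw [bfold_length] at this
  simp [PySem.Dict.empty, PySem.Dict.values] at this
  omega
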